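-- pv_equiv track=rewrite | github.com/rschaeff/pyECOD | ecod/pipelines/hhsearch_pipeline.py | _positions_to_ranges
-- ===== SOURCE A (Python) =====
-- from typing import List, Dict, Any, Optional, Tuple, Set
--
-- def _positions_to_ranges(positions: List[int]) -> str:
--     """Convert a list of positions to a range string"""
--     if not positions:
--         return ""
--
--     positions = sorted(positions)
--     ranges = []
--
--     start = positions[0]
--     prev = start
--
--     for pos in positions[1:]:
--         if pos > prev + 1:
--             ranges.append(f"{start}-{prev}")
--             start = pos
--         prev = pos
--
--     ranges.append(f"{start}-{prev}")
--     return ",".join(ranges)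
-- ===== SOURCE B (Python) =====
-- def _positions_to_ranges(positions):
--     """Convert a list of positions to a range string"""
--     if not positions:
--         return ""
--
--     uniq = sorted(set(positions))
--
--     # Build the list of (first, last) runs back-to-front: walk the distinct
--     # positions from largest to smallest and either extend the most recently
--     # built run downwards or open a new singleton run.
--     runs = []  # runs in DESCENDING order of position; runs[-1] is the lowest so far
--     for x in reversed(uniq):
--         if runs and runs[-1][0] == x + 1:
--             runs[-1] = (x, runs[-1][1])
--         else:
--             runs.append((x, x))
--
--     return ",".join(f"{a}-{b}" for a, b in reversed(runs))
-- ===== Notes on version B (the rewrite author's own statement) =====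
-- stated objective: alternative
-- what changed: B dedupes with set(), walks the distinct positions in descending order building explicit (first,last) run pairs back-to-front (extending the last-built run or opening a new one), and formats the runs at the end, instead of A's forward scan over the duplicate-carrying sorted list with start/prev state emitting strings on each gap.
import Mathlib
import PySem

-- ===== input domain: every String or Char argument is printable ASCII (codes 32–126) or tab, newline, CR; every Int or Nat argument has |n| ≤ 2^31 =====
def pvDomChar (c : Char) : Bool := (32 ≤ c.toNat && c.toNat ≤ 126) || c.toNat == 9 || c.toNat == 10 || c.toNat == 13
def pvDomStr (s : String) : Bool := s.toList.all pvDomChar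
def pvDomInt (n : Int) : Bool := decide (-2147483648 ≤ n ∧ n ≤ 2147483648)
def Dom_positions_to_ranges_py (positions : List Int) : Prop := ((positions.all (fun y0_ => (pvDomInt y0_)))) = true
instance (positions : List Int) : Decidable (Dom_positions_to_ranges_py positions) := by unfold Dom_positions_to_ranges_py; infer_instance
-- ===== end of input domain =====

-- B dedupes with set() and regroups the distinct positions back-to-front into (first,last) run
-- pairs instead of A's forward scan with start/prev state; same return value, proven equal.

-- ===== PORT A =====
-- literal port of A: sort, then fold over positions[1:] with state (ranges, start, prev)
def positions_to_ranges_py (positions : List Int) : String :=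
  if positions = [] then ""
  else
    match PySem.List.sorted positions (fun x => x) false with
    | [] => ""  -- unreachable: sorted of a nonempty list is nonempty
    | p0 :: rest =>
      let st := rest.foldl (fun (st : List String × Int × Int) (pos : Int) =>
        let (ranges, start, prev) := st
        if pos > prev + 1 then
          (ranges ++ [PySem.Int.toStr start ++ "-" ++ PySem.Int.toStr prev], pos, pos)
        else (ranges, start, pos)) ([], p0, p0)
      PySem.Str.join "," (st.1 ++ [PySem.Int.toStr st.2.1 ++ "-" ++ PySem.Int.toStr st.2.2])

-- ===== PORT B =====
-- literal port of B (Source B): sorted(set(..)), reversed walk building (first,last) runs, format at the end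
def positions_to_ranges_py_alt (positions : List Int) : String :=
  if positions = [] then ""
  else
    let uniq := PySem.List.sorted (PySem.Set.ofList positions) (fun x => x) false
    let runs := uniq.reverse.foldl (fun (runs : List (Int × Int)) (x : Int) =>
      match runs.getLast? with
      | some (a, b) => if a = x + 1 then runs.dropLast ++ [(x, b)] else runs ++ [(x, x)]
      | none => runs ++ [(x, x)]) []
    PySem.Str.join "," (runs.reverse.map (fun r => PySem.Int.toStr r.1 ++ "-" ++ PySem.Int.toStr r.2))

-- ===== PRECONDITION & SPEC =====
def Spec_positions_to_ranges_py (positions : List Int) (out : String) : Prop := out = positions_to_ranges_py_alt positions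
instance (positions : List Int) (out : String) : Decidable (Spec_positions_to_ranges_py positions out) := by unfold Spec_positions_to_ranges_py; infer_instance

-- ===== CLAIM (what is proved, stated in full; the proofs are below) =====
def Claim_equal_positions_to_ranges_py : Prop := ∀ (positions : List Int), Dom_positions_to_ranges_py positions → Spec_positions_to_ranges_py positions (positions_to_ranges_py positions)

-- ===== LEMMAS AND PROOFS =====

-- A's loop, as a structural recursion on the remaining positions
def pvRunsA (start prev : Int) : List Int → List String
  | [] => [PySem.Int.toStr start ++ "-" ++ PySem.Int.toStr prev]
  | p :: rest => if p > prev + 1 then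
      (PySem.Int.toStr start ++ "-" ++ PySem.Int.toStr prev) :: pvRunsA p p rest
    else pvRunsA start p rest

-- remove adjacent duplicates of a (sorted) list, given the previous element
def pvDD (prev : Int) : List Int → List Int
  | [] => []
  | p :: rest => if p = prev then pvDD prev rest else p :: pvDD p rest

-- B's grouping, as a structural (right-to-left) recursion producing the runs in ascending order
def pvRunsB : List Int → List (Int × Int)
  | [] => []
  | x :: xs =>
    match pvRunsB xs with
    | [] => [(x, x)]
    | (a, b) :: rs => if a = x + 1 then (x, b) :: rs else (x, x) :: (a, b) :: rs

theorem pvRunsB_unfold (x : Int) (xs : List Int) : pvRunsB (x :: xs) =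
    (match pvRunsB xs with
     | [] => [(x, x)]
     | (a, b) :: rs => if a = x + 1 then (x, b) :: rs else (x, x) :: (a, b) :: rs) := rfl

def pvFmt (r : Int × Int) : String := PySem.Int.toStr r.1 ++ "-" ++ PySem.Int.toStr r.2

def pvStepA (st : List String × Int × Int) (pos : Int) : List String × Int × Int :=
  if pos > st.2.2 + 1 then
    (st.1 ++ [PySem.Int.toStr st.2.1 ++ "-" ++ PySem.Int.toStr st.2.2], pos, pos)
  else (st.1, st.2.1, pos)

-- A's foldl equals pvRunsA
theorem pvFoldlA (rest : List Int) : ∀ (ranges : List String) (start prev : Int),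
    (rest.foldl pvStepA (ranges, start, prev)).1
      ++ [PySem.Int.toStr (rest.foldl pvStepA (ranges, start, prev)).2.1 ++ "-"
            ++ PySem.Int.toStr (rest.foldl pvStepA (ranges, start, prev)).2.2]
    = ranges ++ pvRunsA start prev rest := by
  induction rest with
  | nil => intro ranges start prev; simp [pvRunsA]
  | cons p rs ih =>
    intro ranges start prev
    by_cases h : p > prev + 1
    · simp [pvStepA, pvRunsA, h, ih, List.append_assoc]
    · simp [pvStepA, pvRunsA, h, ih]

-- A's loop ignores duplicates in its sorted input
theorem pvRunsA_dd (rest : List Int) : ∀ (start prev : Int),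
    pvRunsA start prev rest = pvRunsA start prev (pvDD prev rest) := by
  induction rest with
  | nil => intro start prev; simp [pvDD]
  | cons p rs ih =>
    intro start prev
    by_cases hp : p = prev
    · subst hp
      have hd : pvDD p (p :: rs) = pvDD p rs := by simp [pvDD]
      have l : pvRunsA start p (p :: rs) = pvRunsA start p rs := by
        simp [pvRunsA, show ¬ (p > p + 1) from by omega]
      rw [hd, l, ih start p]
    · simp only [pvDD, if_neg hp]
      by_cases h : p > prev + 1
      · have l : ∀ t, pvRunsA start prev (p :: t) =
            (PySem.Int.toStr start ++ "-" ++ PySem.Int.toStr prev) :: pvRunsA p p t := by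
          intro t; simp [pvRunsA, h]
        rw [l, l, ih p p]
      · have l : ∀ t, pvRunsA start prev (p :: t) = pvRunsA start p t := by
          intro t; simp [pvRunsA, h]
        rw [l, l, ih start p]

theorem pvDD_subset (rest : List Int) : ∀ (prev x : Int), x ∈ pvDD prev rest → x ∈ rest := by
  induction rest with
  | nil => intro prev x hx; simp [pvDD] at hx
  | cons p rs ih =>
    intro prev x hx
    simp only [pvDD] at hx
    by_cases hp : p = prev
    · rw [if_pos hp] at hx
      exact List.mem_cons_of_mem _ (ih prev x hx)
    · rw [if_neg hp] at hx
      rcases List.mem_cons.mp hx with h | h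
      · exact h ▸ List.mem_cons_self
      · exact List.mem_cons_of_mem _ (ih p x h)

theorem pvDD_mem (rest : List Int) : ∀ (prev x : Int), x ∈ prev :: pvDD prev rest ↔ x ∈ prev :: rest := by
  induction rest with
  | nil => intro prev x; simp [pvDD]
  | cons p rs ih =>
    intro prev x
    simp only [pvDD]
    by_cases hp : p = prev
    · subst hp
      rw [if_pos rfl, ih]
      simp [List.mem_cons]
    · rw [if_neg hp]
      constructor
      · intro hx
        rcases List.mem_cons.mp hx with h | h
        · exact h ▸ List.mem_cons_self
        · rcases List.mem_cons.mp h with h' | h'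
          · exact List.mem_cons_of_mem _ (h' ▸ List.mem_cons_self)
          · exact List.mem_cons_of_mem _ (List.mem_cons_of_mem _ (pvDD_subset rs p x h'))
      · intro hx
        rcases List.mem_cons.mp hx with h | h
        · exact h ▸ List.mem_cons_self
        · rcases List.mem_cons.mp h with h' | h'
          · exact List.mem_cons_of_mem _ (h' ▸ List.mem_cons_self)
          · have := (ih p x).mpr (List.mem_cons_of_mem _ h')
            rcases List.mem_cons.mp this with h'' | h''
            · exact List.mem_cons_of_mem _ (h'' ▸ List.mem_cons_self)
            · exact List.mem_cons_of_mem _ (List.mem_cons_of_mem _ h'')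

theorem pvDD_pairwise (rest : List Int) : ∀ (prev : Int), (prev :: rest).Pairwise (· ≤ ·) →
    (prev :: pvDD prev rest).Pairwise (· < ·) := by
  induction rest with
  | nil => intro prev _; simp [pvDD]
  | cons p rs ih =>
    intro prev hpw
    rw [List.pairwise_cons] at hpw
    obtain ⟨hle, hpw'⟩ := hpw
    rw [List.pairwise_cons] at hpw'
    obtain ⟨hle', hpw''⟩ := hpw'
    simp only [pvDD]
    by_cases hp : p = prev
    · rw [if_pos hp]
      exact ih prev (List.pairwise_cons.mpr ⟨fun y hy => hle y (List.mem_cons_of_mem _ hy), hpw''⟩)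
    · rw [if_neg hp]
      have hlt : prev < p := lt_of_le_of_ne (hle p List.mem_cons_self) (Ne.symm hp)
      have htail : (p :: pvDD p rs).Pairwise (· < ·) :=
        ih p (List.pairwise_cons.mpr ⟨hle', hpw''⟩)
      refine List.pairwise_cons.mpr ⟨?_, htail⟩
      intro y hy
      rcases List.mem_cons.mp hy with h | h
      · exact h ▸ hlt
      · exact lt_of_lt_of_le hlt (hle' y (pvDD_subset rs p y h))

-- head of B's runs starts at the list head
theorem pvRunsB_cons (x : Int) (xs : List Int) :
    ∃ e rs, pvRunsB (x :: xs) = (x, e) :: rs := by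
  rw [pvRunsB_unfold]
  rcases h : pvRunsB xs with _ | ⟨⟨a, b⟩, rs⟩
  · exact ⟨x, [], rfl⟩
  · by_cases hc : a = x + 1
    · exact ⟨b, rs, by simp [hc]⟩
    · exact ⟨x, (a, b) :: rs, by simp [hc]⟩

-- main: on a strictly increasing tail, A's loop yields exactly B's formatted runs
theorem pvMain (rest : List Int) : ∀ (start prev : Int), (prev :: rest).Pairwise (· < ·) →
    pvRunsA start prev rest =
      (match pvRunsB (prev :: rest) with
       | [] => []
       | (_, e) :: rs => (PySem.Int.toStr start ++ "-" ++ PySem.Int.toStr e) :: rs.map pvFmt) := by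
  induction rest with
  | nil =>
    intro start prev _
    simp [pvRunsA, pvRunsB]
  | cons p rs0 ih =>
    intro start prev hpw
    rw [List.pairwise_cons] at hpw
    obtain ⟨hlt', hpw'⟩ := hpw
    have hlt : prev < p := hlt' p List.mem_cons_self
    obtain ⟨e', rs', h'⟩ := pvRunsB_cons p rs0
    have hrw : pvRunsB (prev :: p :: rs0) =
        (if p = prev + 1 then (prev, e') :: rs' else (prev, prev) :: (p, e') :: rs') := by
      rw [pvRunsB_unfold prev (p :: rs0), h']
    by_cases hc : p = prev + 1
    · have l : pvRunsA start prev (p :: rs0) = pvRunsA start p rs0 := by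
        simp [pvRunsA, show ¬ (p > prev + 1) from by omega]
      rw [l, ih start p hpw', h', hrw, if_pos hc]
    · have l : pvRunsA start prev (p :: rs0) =
          (PySem.Int.toStr start ++ "-" ++ PySem.Int.toStr prev) :: pvRunsA p p rs0 := by
        simp [pvRunsA, show p > prev + 1 from by omega]
      rw [l, ih p p hpw', h', hrw, if_neg hc]
      simp [pvFmt]

def pvStepB (runs : List (Int × Int)) (x : Int) : List (Int × Int) :=
  match runs.getLast? with
  | some (a, b) => if a = x + 1 then runs.dropLast ++ [(x, b)] else runs ++ [(x, x)]
  | none => runs ++ [(x, x)]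

-- B's foldl over the reversed list computes pvRunsB, reversed
theorem pvFoldlB (uniq : List Int) :
    (uniq.reverse.foldl pvStepB []).reverse = pvRunsB uniq := by
  rw [List.foldl_reverse]
  induction uniq with
  | nil => rfl
  | cons x xs ih =>
    rw [List.foldr_cons, pvRunsB_unfold, ← ih]
    rcases h : (List.foldr (fun x y => pvStepB y x) [] xs).reverse with _ | ⟨⟨a, b⟩, t⟩
    · have hnil : List.foldr (fun x y => pvStepB y x) [] xs = [] := by
        simpa using congrArg List.reverse h
      rw [hnil]
      simp [pvStepB]
    · have hacc : List.foldr (fun x y => pvStepB y x) [] xs = t.reverse ++ [(a, b)] := by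
        simpa using congrArg List.reverse h
      rw [hacc]
      by_cases hc : a = x + 1
      · simp [pvStepB, hc]
      · simp [pvStepB, hc]

theorem pvFoldlA_port (rest : List Int) (init : List String × Int × Int) :
    rest.foldl (fun (st : List String × Int × Int) (pos : Int) =>
      let (ranges, start, prev) := st
      if pos > prev + 1 then
        (ranges ++ [PySem.Int.toStr start ++ "-" ++ PySem.Int.toStr prev], pos, pos)
      else (ranges, start, pos)) init = rest.foldl pvStepA init := by
  have h : (fun (st : List String × Int × Int) (pos : Int) =>
      let (ranges, start, prev) := st
      if pos > prev + 1 then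
        (ranges ++ [PySem.Int.toStr start ++ "-" ++ PySem.Int.toStr prev], pos, pos)
      else (ranges, start, pos)) = pvStepA := by
    funext st pos
    rcases st with ⟨r, s, p⟩
    rfl
  rw [h]

theorem pvFoldlB_port (l : List Int) (init : List (Int × Int)) :
    l.foldl (fun (runs : List (Int × Int)) (x : Int) =>
      match runs.getLast? with
      | some (a, b) => if a = x + 1 then runs.dropLast ++ [(x, b)] else runs ++ [(x, x)]
      | none => runs ++ [(x, x)]) init = l.foldl pvStepB init := rfl

-- ===== VERDICT (by name: the statement is the Claim_ definition above) =====
theorem positions_to_ranges_py_spec : Claim_equal_positions_to_ranges_py := by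
  intro positions _
  unfold Spec_positions_to_ranges_py
  by_cases hnil : positions = []
  · simp [positions_to_ranges_py, positions_to_ranges_py_alt, hnil]
  · rcases hs : PySem.List.sorted positions (fun x => x) false with _ | ⟨p0, rest⟩
    · exact absurd ((PySem.List.sorted_eq_nil_iff positions (fun x => x) false).mp hs) hnil
    · have hple : (p0 :: rest).Pairwise (· ≤ ·) := by
        have h := PySem.List.sorted_pairwise positions (fun x => x)
        rw [hs] at h
        exact h
      have hpair : (p0 :: pvDD p0 rest).Pairwise (· < ·) := pvDD_pairwise rest p0 hple
      have hmem : ∀ x, x ∈ (p0 :: pvDD p0 rest) ↔ x ∈ PySem.Set.ofList positions := by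
        intro x
        rw [pvDD_mem rest p0 x, ← hs, PySem.List.mem_sorted, PySem.Set.mem_ofList]
      have hperm : (p0 :: pvDD p0 rest).Perm (PySem.Set.ofList positions) := by
        refine (List.perm_ext_iff_of_nodup ?_ (PySem.Set.nodup_ofList positions)).mpr hmem
        exact List.Pairwise.imp (fun hab => ne_of_lt hab) hpair
      have huniq : PySem.List.sorted (PySem.Set.ofList positions) (fun x => x) false
          = p0 :: pvDD p0 rest :=
        PySem.List.sorted_eq_of_perm_of_pairwise_lt (PySem.Set.ofList positions)
          (p0 :: pvDD p0 rest) (fun x => x) hperm hpair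
      obtain ⟨e, rs, hB⟩ := pvRunsB_cons p0 (pvDD p0 rest)
      simp only [positions_to_ranges_py, positions_to_ranges_py_alt]
      rw [if_neg hnil, if_neg hnil, hs, huniq]
      dsimp only
      rw [pvFoldlA_port, pvFoldlB_port, pvFoldlA rest [] p0 p0, List.nil_append,
        pvRunsA_dd rest p0 p0, pvMain (pvDD p0 rest) p0 p0 hpair, pvFoldlB, hB]
      rfl
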